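-- pv_equiv track=rewrite | github.com/Sonlux/ESCAI | escai_framework/cli/utils/validation_integration.py | _guess_parameter_type
-- ===== SOURCE A (Python) =====
-- def _guess_parameter_type(param_name: str) -> str:
--     """Guess parameter type based on name patterns"""
--     name_lower = param_name.lower()
--
--     # File/directory patterns
--     if any(keyword in name_lower for keyword in ['file', 'path', 'config']):
--         if any(keyword in name_lower for keyword in ['dir', 'directory', 'folder']):
--             return 'directory_path'
--         return 'file_path'
--
--     # URL patterns
--     if any(keyword in name_lower for keyword in ['url', 'endpoint', 'uri']):
--         return 'url'
--
--     # Email patterns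
--     if 'email' in name_lower:
--         return 'email'
--
--     # Numeric patterns
--     if any(keyword in name_lower for keyword in ['port', 'timeout', 'interval', 'limit', 'count', 'max', 'min']):
--         return 'integer'
--
--     if any(keyword in name_lower for keyword in ['confidence', 'threshold', 'rate', 'ratio']):
--         return 'float'
--
--     # Boolean patterns
--     if any(keyword in name_lower for keyword in ['enable', 'disable', 'flag', 'is_', 'has_', 'should_']):
--         return 'boolean'
--
--     # JSON/YAML patterns
--     if any(keyword in name_lower for keyword in ['json', 'config_data']):
--         return 'json'
--
--     if 'yaml' in name_lower:
--         return 'yaml'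
--
--     # Default to string
--     return 'string'
-- ===== SOURCE B (Python) =====
-- # Different algorithm: instead of scanning the name once per keyword (A's if-chain of
-- # `any(k in name ...)` tests), B slides a window over the lowered name once, looks up every
-- # keyword-sized substring (lengths 3..11) in a keyword->tag dictionary, collects the set of
-- # matched tags, and then picks the highest-priority tag.
--
-- _TAG_OF = {
--     'file': 'file', 'path': 'file', 'config': 'file',
--     'dir': 'dir', 'directory': 'dir', 'folder': 'dir',
--     'url': 'url', 'endpoint': 'url', 'uri': 'url',
--     'email': 'email',
--     'port': 'integer', 'timeout': 'integer', 'interval': 'integer',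
--     'limit': 'integer', 'count': 'integer', 'max': 'integer', 'min': 'integer',
--     'confidence': 'float', 'threshold': 'float', 'rate': 'float', 'ratio': 'float',
--     'enable': 'boolean', 'disable': 'boolean', 'flag': 'boolean',
--     'is_': 'boolean', 'has_': 'boolean', 'should_': 'boolean',
--     'json': 'json', 'config_data': 'json',
--     'yaml': 'yaml',
-- }
--
--
-- def _guess_parameter_type(param_name: str) -> str:
--     """Guess parameter type based on name patterns"""
--     name = param_name.lower()
--     tags = set()
--     for i in range(len(name)):
--         for length in range(3, 12):
--             tag = _TAG_OF.get(name[i:i + length])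
--             if tag is not None:
--                 tags.add(tag)
--     if 'file' in tags:
--         return 'directory_path' if 'dir' in tags else 'file_path'
--     for tag in ('url', 'email', 'integer', 'float', 'boolean', 'json', 'yaml'):
--         if tag in tags:
--             return tag
--     return 'string'
-- ===== Notes on version B (the rewrite author's own statement) =====
-- stated objective: alternative
-- what changed: B slides a window over the lowered name once, looking up every keyword-sized substring (lengths 3-11) in a keyword->tag dictionary to collect a set of matched tags, then returns the highest-priority tag; A instead rescans the whole name once per keyword in a chain of any(k in name) if-blocks.
import Mathlib
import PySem

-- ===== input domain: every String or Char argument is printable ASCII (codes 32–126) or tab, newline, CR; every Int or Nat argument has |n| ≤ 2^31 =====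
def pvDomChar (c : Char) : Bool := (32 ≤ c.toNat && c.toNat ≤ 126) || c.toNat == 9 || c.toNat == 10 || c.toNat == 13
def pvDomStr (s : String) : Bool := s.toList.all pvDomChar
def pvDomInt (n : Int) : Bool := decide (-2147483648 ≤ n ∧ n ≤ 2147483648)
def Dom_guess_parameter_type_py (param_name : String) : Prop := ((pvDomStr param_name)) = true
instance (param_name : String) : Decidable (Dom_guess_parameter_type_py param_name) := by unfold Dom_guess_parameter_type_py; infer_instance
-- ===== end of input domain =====

-- B replaces A's per-keyword substring scans (an if-chain of any(k in name) tests) by one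
-- sliding-window pass that looks every keyword-sized substring up in a keyword->tag dictionary,
-- collects the matched tags as a set, and returns the highest-priority tag (alternative algorithm).


-- ===== PORT A =====
def guess_parameter_type_py (param_name : String) : String :=
  let name_lower := PySem.Str.lower param_name
  if ["file", "path", "config"].any (fun keyword => PySem.Str.isIn keyword name_lower) then
    if ["dir", "directory", "folder"].any (fun keyword => PySem.Str.isIn keyword name_lower) then
      "directory_path"
    else
      "file_path"
  else if ["url", "endpoint", "uri"].any (fun keyword => PySem.Str.isIn keyword name_lower) then
    "url"
  else if PySem.Str.isIn "email" name_lower then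
    "email"
  else if ["port", "timeout", "interval", "limit", "count", "max", "min"].any
      (fun keyword => PySem.Str.isIn keyword name_lower) then
    "integer"
  else if ["confidence", "threshold", "rate", "ratio"].any
      (fun keyword => PySem.Str.isIn keyword name_lower) then
    "float"
  else if ["enable", "disable", "flag", "is_", "has_", "should_"].any
      (fun keyword => PySem.Str.isIn keyword name_lower) then
    "boolean"
  else if ["json", "config_data"].any (fun keyword => PySem.Str.isIn keyword name_lower) then
    "json"
  else if PySem.Str.isIn "yaml" name_lower then
    "yaml"
  else
    "string"

-- ===== PORT B =====
-- the (keyword, tag) pairs of Source B's module-level dictionary _TAG_OF, in source order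
def pvPairs : List (String × String) :=
  [ ("file", "file"), ("path", "file"), ("config", "file")
  , ("dir", "dir"), ("directory", "dir"), ("folder", "dir")
  , ("url", "url"), ("endpoint", "url"), ("uri", "url")
  , ("email", "email")
  , ("port", "integer"), ("timeout", "integer"), ("interval", "integer")
  , ("limit", "integer"), ("count", "integer"), ("max", "integer"), ("min", "integer")
  , ("confidence", "float"), ("threshold", "float"), ("rate", "float"), ("ratio", "float")
  , ("enable", "boolean"), ("disable", "boolean"), ("flag", "boolean")
  , ("is_", "boolean"), ("has_", "boolean"), ("should_", "boolean")
  , ("json", "json"), ("config_data", "json")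
  , ("yaml", "yaml") ]

def pvTagOf : PySem.Dict String String := PySem.Dict.ofList pvPairs

-- the two nested for-loops of Source B building the set of matched tags
def pvTags (name : String) : PySem.Set String :=
  (PySem.List.pyRange 0 (PySem.Str.len name) 1).foldl (fun tags i =>
    (PySem.List.pyRange 3 12 1).foldl (fun tags length =>
      match pvTagOf.get? (PySem.Str.slice name (some i) (some (i + length))) with
      | some tag => PySem.Set.add tags tag
      | none => tags) tags) PySem.Set.empty

def guess_parameter_type_py_alt (param_name : String) : String :=
  let name := PySem.Str.lower param_name
  let tags := pvTags name
  if PySem.Set.contains tags "file" then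
    if PySem.Set.contains tags "dir" then "directory_path" else "file_path"
  else
    -- for tag in (...): if tag in tags: return tag / return 'string'
    (["url", "email", "integer", "float", "boolean", "json", "yaml"].find?
        (fun tag => PySem.Set.contains tags tag)).getD "string"

-- ===== PRECONDITION & SPEC =====
def Spec_guess_parameter_type_py (param_name : String) (out : String) : Prop := out = guess_parameter_type_py_alt param_name
instance (param_name : String) (out : String) : Decidable (Spec_guess_parameter_type_py param_name out) := by unfold Spec_guess_parameter_type_py; infer_instance

-- ===== CLAIM (what is proved, stated in full; the proofs are below) =====
def Claim_equal_guess_parameter_type_py : Prop := ∀ (param_name : String), Dom_guess_parameter_type_py param_name → Spec_guess_parameter_type_py param_name (guess_parameter_type_py param_name)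

-- ===== LEMMAS AND PROOFS =====

-- membership in a fold that adds a tag whenever the dictionary lookup hits
theorem pv_mem_foldl_opt (f : Int → Option String) (l : List Int) (s : PySem.Set String) (x : String) :
    x ∈ l.foldl (fun acc y =>
        match f y with
        | some t => PySem.Set.add acc t
        | none => acc) s ↔ x ∈ s ∨ ∃ y ∈ l, f y = some x := by
  induction l generalizing s with
  | nil => simp
  | cons a l ih =>
    simp only [List.foldl_cons]
    cases h : f a with
    | none =>
      rw [ih]
      simp only [List.mem_cons]
      constructor
      · rintro (hs | ⟨y, hy, hfy⟩)
        · exact Or.inl hs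
        · exact Or.inr ⟨y, Or.inr hy, hfy⟩
      · rintro (hs | ⟨y, hy | hy, hfy⟩)
        · exact Or.inl hs
        · subst hy; rw [h] at hfy; cases hfy
        · exact Or.inr ⟨y, hy, hfy⟩
    | some t =>
      rw [ih]
      simp only [PySem.Set.mem_add, List.mem_cons]
      constructor
      · rintro ((hs | hx) | ⟨y, hy, hfy⟩)
        · exact Or.inl hs
        · exact Or.inr ⟨a, Or.inl rfl, by rw [h, hx]⟩
        · exact Or.inr ⟨y, Or.inr hy, hfy⟩
      · rintro (hs | ⟨y, hy | hy, hfy⟩)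
        · exact Or.inl (Or.inl hs)
        · subst hy; rw [h] at hfy
          exact Or.inl (Or.inr (by injection hfy with h'; exact h'.symm))
        · exact Or.inr ⟨y, hy, hfy⟩

theorem pv_mem_pvTags (name : String) (t : String) :
    t ∈ pvTags name ↔ ∃ i ∈ PySem.List.pyRange 0 (PySem.Str.len name) 1,
      ∃ L ∈ PySem.List.pyRange 3 12 1,
        pvTagOf.get? (PySem.Str.slice name (some i) (some (i + L))) = some t := by
  unfold pvTags
  generalize PySem.List.pyRange 0 (PySem.Str.len name) 1 = outer
  suffices h : ∀ (outer : List Int) (s : PySem.Set String),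
      t ∈ outer.foldl (fun tags i =>
        (PySem.List.pyRange 3 12 1).foldl (fun tags length =>
          match pvTagOf.get? (PySem.Str.slice name (some i) (some (i + length))) with
          | some tag => PySem.Set.add tags tag
          | none => tags) tags) s ↔
      t ∈ s ∨ ∃ i ∈ outer, ∃ L ∈ PySem.List.pyRange 3 12 1,
        pvTagOf.get? (PySem.Str.slice name (some i) (some (i + L))) = some t by
    simpa [PySem.Set.empty] using h outer PySem.Set.empty
  intro outer
  induction outer with
  | nil => simp
  | cons a l ih =>
    intro s
    simp only [List.foldl_cons]
    rw [ih, pv_mem_foldl_opt]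
    simp only [List.mem_cons]
    constructor
    · rintro ((hs | ⟨L, hL, hg⟩) | ⟨i, hi, hrest⟩)
      · exact Or.inl hs
      · exact Or.inr ⟨a, Or.inl rfl, L, hL, hg⟩
      · exact Or.inr ⟨i, Or.inr hi, hrest⟩
    · rintro (hs | ⟨i, hi | hi, hrest⟩)
      · exact Or.inl (Or.inl hs)
      · subst hi; exact Or.inl (Or.inr hrest)
      · exact Or.inr ⟨i, hi, hrest⟩

-- every dictionary hit is one of the 30 literal (keyword, tag) pairs
theorem pv_get?_pvTagOf_mem (sub t : String) (h : pvTagOf.get? sub = some t) :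
    (sub, t) ∈ pvPairs := by
  have hmem := PySem.Dict.mem_items_of_get?_eq_some _ h
  rwa [show pvTagOf.items = pvPairs by decide] at hmem

-- a keyword-sized substring occurs at some window position iff Python's `kw in name` holds
theorem pv_occ_iff (nm kw : String) (h3 : 3 ≤ kw.toList.length) (h11 : kw.toList.length ≤ 11) :
    (∃ i ∈ PySem.List.pyRange 0 (PySem.Str.len nm) 1, ∃ L ∈ PySem.List.pyRange 3 12 1,
        PySem.Str.slice nm (some i) (some (i + L)) = kw) ↔ PySem.Str.isIn kw nm = true := by
  rw [PySem.Str.isIn_iff_infix]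
  constructor
  · rintro ⟨i, hi, L, hL, hslice⟩
    rw [PySem.List.mem_pyRange_one] at hi hL
    have hls : (PySem.Str.slice nm (some i) (some (i + L))).toList = kw.toList := by
      rw [hslice]
    rw [PySem.Str.toList_slice, PySem.Chars.slice_eq_listSlice,
      PySem.List.slice_toNat nm.toList (by omega) (by omega)] at hls
    rw [← hls]
    exact ((List.take_prefix _ _).isInfix).trans ((List.drop_suffix _ _).isInfix)
  · intro hinf
    obtain ⟨pre, post, hst⟩ := hinf
    have hlen : nm.toList.length = pre.length + kw.toList.length + post.length := by
      rw [← hst]; simp; omega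
    refine ⟨(pre.length : Int), ?_, (kw.toList.length : Int), ?_, ?_⟩
    · rw [PySem.List.mem_pyRange_one, PySem.Str.len_eq]
      constructor
      · exact_mod_cast Nat.zero_le _
      · exact_mod_cast (by omega : pre.length < nm.toList.length)
    · rw [PySem.List.mem_pyRange_one]
      constructor
      · exact_mod_cast h3
      · exact_mod_cast (by omega : kw.toList.length < 12)
    · rw [← String.toList_inj, PySem.Str.toList_slice, PySem.Chars.slice_eq_listSlice,
        PySem.List.slice_natCast_add]
      rw [← hst, List.append_assoc, List.drop_left, List.take_left]

-- the 30 window-size bounds 3 ≤ |kw| ≤ 11, in one decidable statement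
theorem pv_pairs_len : ∀ p ∈ pvPairs, 3 ≤ p.1.toList.length ∧ p.1.toList.length ≤ 11 := by decide

theorem pv_pairs_get? : ∀ p ∈ pvPairs, pvTagOf.get? p.1 = some p.2 := by decide

-- `tag t is collected` ↔ some keyword carrying tag t occurs as a substring
theorem pv_contains_pvTags (nm t : String) :
    PySem.Set.contains (pvTags nm) t = true ↔
      ∃ p ∈ pvPairs, p.2 = t ∧ PySem.Str.isIn p.1 nm = true := by
  rw [PySem.Set.contains_iff, pv_mem_pvTags]
  constructor
  · rintro ⟨i, hi, L, hL, hget⟩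
    have hmem := pv_get?_pvTagOf_mem _ _ hget
    refine ⟨_, hmem, rfl, ?_⟩
    exact (pv_occ_iff nm _ (pv_pairs_len _ hmem).1 (pv_pairs_len _ hmem).2).mp ⟨i, hi, L, hL, rfl⟩
  · rintro ⟨p, hp, rfl, hin⟩
    obtain ⟨i, hi, L, hL, hsl⟩ :=
      (pv_occ_iff nm p.1 (pv_pairs_len _ hp).1 (pv_pairs_len _ hp).2).mpr hin
    exact ⟨i, hi, L, hL, by rw [hsl]; exact pv_pairs_get? _ hp⟩

set_option maxHeartbeats 1000000 in
-- ===== VERDICT (by name: the statement is the Claim_ definition above) =====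
theorem guess_parameter_type_py_spec : Claim_equal_guess_parameter_type_py := by
  intro param_name _
  unfold Spec_guess_parameter_type_py
  simp only [guess_parameter_type_py, guess_parameter_type_py_alt]
  generalize PySem.Str.lower param_name = nm
  have hfile : PySem.Set.contains (pvTags nm) "file"
      = (PySem.Str.isIn "file" nm || (PySem.Str.isIn "path" nm || PySem.Str.isIn "config" nm)) := by
    rw [Bool.eq_iff_iff, pv_contains_pvTags]; simp [pvPairs]
  have hdir : PySem.Set.contains (pvTags nm) "dir"
      = (PySem.Str.isIn "dir" nm || (PySem.Str.isIn "directory" nm || PySem.Str.isIn "folder" nm)) := by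
    rw [Bool.eq_iff_iff, pv_contains_pvTags]; simp [pvPairs]
  have hurl : PySem.Set.contains (pvTags nm) "url"
      = (PySem.Str.isIn "url" nm || (PySem.Str.isIn "endpoint" nm || PySem.Str.isIn "uri" nm)) := by
    rw [Bool.eq_iff_iff, pv_contains_pvTags]; simp [pvPairs]
  have hemail : PySem.Set.contains (pvTags nm) "email" = PySem.Str.isIn "email" nm := by
    rw [Bool.eq_iff_iff, pv_contains_pvTags]; simp [pvPairs]
  have hint : PySem.Set.contains (pvTags nm) "integer"
      = (PySem.Str.isIn "port" nm || (PySem.Str.isIn "timeout" nm || (PySem.Str.isIn "interval" nm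
        || (PySem.Str.isIn "limit" nm || (PySem.Str.isIn "count" nm || (PySem.Str.isIn "max" nm
        || PySem.Str.isIn "min" nm)))))) := by
    rw [Bool.eq_iff_iff, pv_contains_pvTags]; simp [pvPairs]
  have hfloat : PySem.Set.contains (pvTags nm) "float"
      = (PySem.Str.isIn "confidence" nm || (PySem.Str.isIn "threshold" nm
        || (PySem.Str.isIn "rate" nm || PySem.Str.isIn "ratio" nm))) := by
    rw [Bool.eq_iff_iff, pv_contains_pvTags]; simp [pvPairs]
  have hbool : PySem.Set.contains (pvTags nm) "boolean"
      = (PySem.Str.isIn "enable" nm || (PySem.Str.isIn "disable" nm || (PySem.Str.isIn "flag" nm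
        || (PySem.Str.isIn "is_" nm || (PySem.Str.isIn "has_" nm || PySem.Str.isIn "should_" nm))))) := by
    rw [Bool.eq_iff_iff, pv_contains_pvTags]; simp [pvPairs]
  have hjson : PySem.Set.contains (pvTags nm) "json"
      = (PySem.Str.isIn "json" nm || PySem.Str.isIn "config_data" nm) := by
    rw [Bool.eq_iff_iff, pv_contains_pvTags]; simp [pvPairs]
  have hyaml : PySem.Set.contains (pvTags nm) "yaml" = PySem.Str.isIn "yaml" nm := by
    rw [Bool.eq_iff_iff, pv_contains_pvTags]; simp [pvPairs]
  simp only [List.find?_cons, List.find?_nil, List.any_cons, List.any_nil, Bool.or_false,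
    hfile, hdir, hurl, hemail, hint, hfloat, hbool, hjson, hyaml]
  generalize (PySem.Str.isIn "file" nm || (PySem.Str.isIn "path" nm || PySem.Str.isIn "config" nm)) = cfile
  generalize (PySem.Str.isIn "dir" nm || (PySem.Str.isIn "directory" nm || PySem.Str.isIn "folder" nm)) = cdir
  generalize (PySem.Str.isIn "url" nm || (PySem.Str.isIn "endpoint" nm || PySem.Str.isIn "uri" nm)) = curl
  generalize (PySem.Str.isIn "email" nm) = cemail
  generalize (PySem.Str.isIn "port" nm || (PySem.Str.isIn "timeout" nm || (PySem.Str.isIn "interval" nm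
    || (PySem.Str.isIn "limit" nm || (PySem.Str.isIn "count" nm || (PySem.Str.isIn "max" nm
    || PySem.Str.isIn "min" nm)))))) = cint
  generalize (PySem.Str.isIn "confidence" nm || (PySem.Str.isIn "threshold" nm
    || (PySem.Str.isIn "rate" nm || PySem.Str.isIn "ratio" nm))) = cfloat
  generalize (PySem.Str.isIn "enable" nm || (PySem.Str.isIn "disable" nm || (PySem.Str.isIn "flag" nm
    || (PySem.Str.isIn "is_" nm || (PySem.Str.isIn "has_" nm || PySem.Str.isIn "should_" nm))))) = cbool
  generalize (PySem.Str.isIn "json" nm || PySem.Str.isIn "config_data" nm) = cjson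
  generalize (PySem.Str.isIn "yaml" nm) = cyaml
  revert cfile cdir curl cemail cint cfloat cbool cjson cyaml
  decide
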